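-- pv_equiv track=rewrite | github.com/WANIWANIWANIWANI/YokuHannCaluculation | 2次構造最適化計算/step1.py | generateRibuPatternList
-- ===== SOURCE A (Python) =====
-- def generateRibuPatternList(numberOfRib):
--     ribPatternList = []
--     for i in range(0, numberOfRib):
--         if i == 0 or i == numberOfRib - 1:
--             ribPatternList.append(0)
--         else:
--             if i % 2 == 0:
--                 ribPatternList.append(1)
--             else:
--                 ribPatternList.append(2)
--     return ribPatternList
-- ===== SOURCE B (Python) =====
-- def generateRibuPatternList(numberOfRib):
--     if numberOfRib <= 0:
--         return []
--     if numberOfRib == 1: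
--         return [0]
--     interior = [2, 1] * ((numberOfRib - 1) // 2)
--     return [0] + interior[:numberOfRib - 2] + [0]
-- ===== Notes on version B (the rewrite author's own statement) =====
-- stated objective: faster
-- what changed: B handles the empty and singleton cases by early return and otherwise builds the interior by tiling the constant block [2,1] with list repetition and slicing it to length n-2, concatenating literal [0] endpoints around it, instead of A's single indexed loop with per-element branch tests; the tiling runs at C level, removing the per-element Python branching.
import Mathlib
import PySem

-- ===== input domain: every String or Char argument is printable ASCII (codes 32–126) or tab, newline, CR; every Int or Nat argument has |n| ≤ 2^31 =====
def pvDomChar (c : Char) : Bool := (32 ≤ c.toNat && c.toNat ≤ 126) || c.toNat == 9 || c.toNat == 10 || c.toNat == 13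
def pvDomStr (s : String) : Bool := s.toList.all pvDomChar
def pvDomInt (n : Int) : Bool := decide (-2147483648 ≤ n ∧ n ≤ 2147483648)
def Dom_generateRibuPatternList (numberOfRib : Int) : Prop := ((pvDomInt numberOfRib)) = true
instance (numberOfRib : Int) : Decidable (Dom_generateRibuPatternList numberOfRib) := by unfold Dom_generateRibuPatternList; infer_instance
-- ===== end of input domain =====

-- B builds the result by tiling the block [2,1], slicing it to the interior length and
-- concatenating literal endpoint zeros, instead of A's indexed loop with branches (objective: alternative).

-- ===== PORT A =====
def generateRibuPatternList (numberOfRib : Int) : List Int :=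
  (PySem.List.pyRange 0 numberOfRib 1).foldl (fun ribPatternList i =>
      if i == 0 || i == numberOfRib - 1 then ribPatternList ++ [0]
      else if i % 2 == 0 then ribPatternList ++ [1]
      else ribPatternList ++ [2]) []

-- ===== PORT B =====
def generateRibuPatternList_alt (numberOfRib : Int) : List Int :=
  if numberOfRib ≤ 0 then []
  else if numberOfRib == 1 then [0]
  else
    let interior := (List.replicate (PySem.Int.floordiv (numberOfRib - 1) 2).toNat
        ([2, 1] : List Int)).flatten
    [0] ++ PySem.List.slice interior none (some (numberOfRib - 2)) ++ [0]

-- ===== PRECONDITION & SPEC =====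
def Spec_generateRibuPatternList (numberOfRib : Int) (out : List Int) : Prop := out = generateRibuPatternList_alt numberOfRib
instance (numberOfRib : Int) (out : List Int) : Decidable (Spec_generateRibuPatternList numberOfRib out) := by unfold Spec_generateRibuPatternList; infer_instance

-- ===== CLAIM =====
def Claim_equal_generateRibuPatternList : Prop := ∀ (numberOfRib : Int), Dom_generateRibuPatternList numberOfRib → Spec_generateRibuPatternList numberOfRib (generateRibuPatternList numberOfRib)

-- ===== LEMMAS AND PROOFS =====

-- A's loop appends one element per index: it is a map over the range.
theorem pv_foldlA (n : Int) (l : List Int) (acc : List Int) :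
    l.foldl (fun r i =>
        if i == 0 || i == n - 1 then r ++ [0]
        else if i % 2 == 0 then r ++ [1] else r ++ [2]) acc
      = acc ++ l.map (fun i =>
          if i == 0 || i == n - 1 then (0 : Int)
          else if i % 2 == 0 then 1 else 2) := by
  induction l generalizing acc with
  | nil => simp
  | cons x xs ih =>
    rw [List.foldl_cons, List.map_cons, ih]
    split_ifs <;> simp

theorem pv_tile_len (a b : Int) (k : Nat) :
    ((List.replicate k ([a, b])).flatten).length = 2 * k := by
  induction k with
  | zero => simp
  | succ k ih => simp [List.replicate_succ, ih]; omega

theorem pv_tile_get (a b : Int) (k j : Nat)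
    (hj : j < ((List.replicate k ([a, b])).flatten).length) :
    ((List.replicate k ([a, b])).flatten)[j] = if j % 2 = 0 then a else b := by
  induction k generalizing j with
  | zero => simp at hj
  | succ k ih =>
    simp only [List.replicate_succ, List.flatten_cons] at hj ⊢
    match j with
    | 0 => simp
    | 1 => simp
    | (j + 2) =>
      have hj' : j < ((List.replicate k ([a, b])).flatten).length := by
        simpa using hj
      rw [List.getElem_append_right (by simp)]
      simpa [Nat.add_mod_right] using ih j hj'

theorem pv_main (n : Int) :
    generateRibuPatternList n = generateRibuPatternList_alt n := by
  by_cases hn0 : n ≤ 0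
  · have h0 : PySem.List.pyRange 0 n 1 = [] := PySem.List.pyRange_one_eq_nil (by omega)
    simp [generateRibuPatternList, generateRibuPatternList_alt, h0, hn0]
  · by_cases hn1 : n = 1
    · subst hn1
      simp [generateRibuPatternList, generateRibuPatternList_alt]
      decide
    · have hn2 : 2 ≤ n := by omega
      unfold generateRibuPatternList generateRibuPatternList_alt
      rw [pv_foldlA]
      rw [if_neg (by omega), if_neg (by simpa using hn1)]
      simp only [List.nil_append]
      have hfd : PySem.Int.floordiv (n - 1) 2 = (n - 1) / 2 :=
        PySem.Int.floordiv_eq_ediv_of_pos (by omega)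
      set k : Nat := (PySem.Int.floordiv (n - 1) 2).toNat with hk
      have hkv : 2 * (k : Int) + 1 = n ∨ 2 * (k : Int) + 2 = n := by
        rw [hk, hfd]; omega
      have hslice : PySem.List.slice ((List.replicate k ([2, 1] : List Int)).flatten)
          none (some (n - 2))
          = ((List.replicate k ([2, 1] : List Int)).flatten).take (n.toNat - 2) := by
        rw [show n - 2 = ((n.toNat - 2 : Nat) : Int) by omega]
        exact PySem.List.slice_to_natCast _ _
      rw [hslice]
      have htl := pv_tile_len (2 : Int) 1 k
      apply List.ext_getElem
      · simp [PySem.List.length_pyRange_one, htl]; omega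
      · intro j h1 h2
        simp only [List.length_map, PySem.List.length_pyRange_one] at h1
        have hj : j < n.toNat := by omega
        simp only [List.getElem_map, PySem.List.getElem_pyRange_one]
        simp only [List.cons_append, List.nil_append]
        match j with
        | 0 =>
          simp
        | (j + 1) =>
          simp only [List.getElem_cons_succ]
          have hlen : (((List.replicate k ([2, 1] : List Int)).flatten).take (n.toNat - 2)).length
              = n.toNat - 2 := by
            simp [htl]; omega
          by_cases hlast : j + 1 = n.toNat - 1
          · rw [List.getElem_append_right (by omega)]
            have hx : ((j : Int) + 1 = n - 1) := by omega
            simp [hlen, hx]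
          · have hjm : j < n.toNat - 2 := by omega
            rw [List.getElem_append_left (by omega)]
            rw [List.getElem_take, pv_tile_get 2 1 k j (by omega)]
            simp only [beq_iff_eq, Bool.or_eq_true]
            push_cast
            rw [if_neg (by omega)]
            split_ifs <;> omega

-- ===== VERDICT =====
theorem generateRibuPatternList_spec : Claim_equal_generateRibuPatternList := by
  intro n _
  exact pv_main n
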